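-- pv_equiv track=rewrite | github.com/Bottersnike/whilelang | whilelang/util.py | phi_prime
-- ===== SOURCE A (Python) =====
-- def phi_prime(x):
--     n = 0
--     m = int(x) + 1
--     while m % 2 == 0 and m > 0:
--         n += 1
--         m >>= 1
--     m = (m - 1) // 2
--
--     return n, m
-- ===== SOURCE B (Python) =====
-- def phi_prime(x):
--     n = 0
--     m = int(x) + 1
--     if m > 0:
--         n = (m & -m).bit_length() - 1
--         m >>= n
--     return n, (m - 1) // 2
-- ===== Notes on version B (the rewrite author's own statement) =====
-- stated objective: alternative
-- what changed: A's halving while-loop that strips trailing factors of 2 is replaced by the closed-form bit extraction n = (m & -m).bit_length() - 1 followed by a single shift m >>= n.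
import Mathlib
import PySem

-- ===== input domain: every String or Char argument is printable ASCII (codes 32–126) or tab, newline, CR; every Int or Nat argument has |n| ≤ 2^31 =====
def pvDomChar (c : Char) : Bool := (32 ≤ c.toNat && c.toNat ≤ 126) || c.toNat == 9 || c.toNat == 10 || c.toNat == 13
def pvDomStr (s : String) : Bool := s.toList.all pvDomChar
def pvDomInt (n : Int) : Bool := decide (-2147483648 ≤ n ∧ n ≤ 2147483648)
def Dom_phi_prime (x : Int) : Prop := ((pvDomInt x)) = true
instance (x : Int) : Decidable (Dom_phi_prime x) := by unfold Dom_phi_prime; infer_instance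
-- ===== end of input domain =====

-- B replaces A's halving loop by the closed-form bit extraction n = (m & -m).bit_length() - 1; m >>= n (alternative decomposition, same cost at these sizes).

-- ===== PORT A =====
-- the while loop of A: carries (n, m); condition and body step for step
def phi_loop (n m : Int) : Int × Int :=
  if PySem.Int.mod m 2 = 0 ∧ m > 0 then phi_loop (n + 1) (m >>> (1:Nat)) else (n, m)
termination_by m.toNat
decreasing_by
  rename_i h
  have _h2 : (0:Int) < m := h.2
  have : m >>> (1:Nat) = m / 2 := by simp [Int.shiftRight_eq_div_pow]
  omega

def phi_prime (x : Int) : Int × Int :=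
  let nm := phi_loop 0 (x + 1)
  (nm.1, PySem.Int.floordiv (nm.2 - 1) 2)

-- ===== PORT B =====
def phi_prime_alt (x : Int) : Int × Int :=
  let m := x + 1
  if m > 0 then
    let n : Int := (PySem.Int.bitLength (PySem.Int.band m (-m)) : Int) - 1
    let m' := m >>> n.toNat   -- n ≥ 0 here, so Python's m >>= n is exactly this shift
    (n, PySem.Int.floordiv (m' - 1) 2)
  else (0, PySem.Int.floordiv (m - 1) 2)

-- ===== PRECONDITION & SPEC =====
def Spec_phi_prime (x : Int) (out : Int × Int) : Prop := out = phi_prime_alt x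
instance (x : Int) (out : Int × Int) : Decidable (Spec_phi_prime x out) := by unfold Spec_phi_prime; infer_instance

-- ===== CLAIM (what is proved, stated in full; the proofs are below) =====
def Claim_equal_phi_prime : Prop := ∀ (x : Int), Dom_phi_prime x → Spec_phi_prime x (phi_prime x)

-- ===== LEMMAS AND PROOFS =====

-- the lowest set bit of k, as A's loop and B's bit trick both isolate it
def lowbit (k : Nat) : Nat := k - (k &&& (k-1))

-- the trailing-zero count both versions compute
def tzN (k : Nat) : Nat := PySem.Int.bitLength ↑(lowbit k) - 1

theorem andA (j : Nat) : (2*j+1) &&& (2*j) = 2*j := by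
  apply Nat.eq_of_testBit_eq
  intro i
  rw [Nat.testBit_and]
  cases i with
  | zero => simp [Nat.testBit_zero]
  | succ i =>
    have h1 : (2*j+1)/2 = j := by omega
    have h2 : (2*j)/2 = j := by omega
    simp only [Nat.testBit_add_one, h1, h2, Bool.and_self]

theorem andB (j : Nat) (hj : 0 < j) : (2*j) &&& (2*j-1) = 2*(j &&& (j-1)) := by
  apply Nat.eq_of_testBit_eq
  intro i
  rw [Nat.testBit_and]
  cases i with
  | zero => simp [Nat.testBit_zero]
  | succ i =>
    have h1 : (2*j-1)/2 = j-1 := by omega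
    have h2 : (2*j)/2 = j := by omega
    have h3 : (2*(j &&& (j-1)))/2 = j &&& (j-1) := by omega
    simp only [Nat.testBit_add_one, h1, h2, h3, Nat.testBit_and]

theorem lowbit_odd (k : Nat) (h : k % 2 = 1) : lowbit k = 1 := by
  obtain ⟨j, rfl⟩ : ∃ j, k = 2*j+1 := ⟨k/2, by omega⟩
  unfold lowbit
  have : 2*j+1-1 = 2*j := by omega
  rw [this, andA]
  omega

theorem lowbit_even (k : Nat) (hk : 0 < k) (h : k % 2 = 0) : lowbit k = 2 * lowbit (k/2) := by
  obtain ⟨j, rfl⟩ : ∃ j, k = 2*j := ⟨k/2, by omega⟩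
  have hj : 0 < j := by omega
  unfold lowbit
  have h2 : (2*j)/2 = j := by omega
  rw [h2, andB j hj]
  have := Nat.and_le_left (n := j) (m := j-1)
  omega

theorem lowbit_pos (k : Nat) (hk : 0 < k) : 0 < lowbit k := by
  unfold lowbit
  have := Nat.and_le_right (n := k) (m := k-1)
  omega

theorem band_neg_self (k : Nat) (hk : 0 < k) :
    PySem.Int.band ↑k (-↑k) = ↑(lowbit k) := by
  unfold PySem.Int.band lowbit
  have h1 : (0:Int) ≤ ↑k := Int.natCast_nonneg k
  have h2 : ¬ (0:Int) ≤ -↑k := by omega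
  rw [if_pos h1, if_neg h2]
  have h3 : (-(-(↑k:Int)) - 1).toNat = k - 1 := by omega
  have h4 : (↑k:Int).toNat = k := Int.toNat_natCast k
  rw [h3, h4]

theorem tzN_odd (k : Nat) (h : k % 2 = 1) : tzN k = 0 := by
  unfold tzN
  rw [lowbit_odd k h]
  decide

theorem bitLength_lowbit_pos (k : Nat) (hk : 0 < k) : 0 < PySem.Int.bitLength ↑(lowbit k) := by
  rw [PySem.Int.bitLength_natCast (lowbit_pos k hk)]
  omega

theorem tzN_even (k : Nat) (hk : 0 < k) (h : k % 2 = 0) : tzN k = tzN (k/2) + 1 := by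
  have hj : 0 < k/2 := by omega
  unfold tzN
  rw [lowbit_even k hk h]
  have hL : 0 < lowbit (k/2) := lowbit_pos _ hj
  rw [PySem.Int.bitLength_natCast (m := 2 * lowbit (k/2)) (by omega)]
  have h2 : (2 * lowbit (k/2))/2 = lowbit (k/2) := by omega
  rw [h2]
  have := bitLength_lowbit_pos (k/2) hj
  omega

theorem natCast_shiftRight (k t : Nat) : (↑k : Int) >>> t = ↑(k >>> t) := rfl

theorem loop_eq (k : Nat) (hk : 0 < k) : ∀ n : Int, phi_loop n ↑k = (n + ↑(tzN k), ↑(k >>> tzN k)) := by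
  induction k using Nat.strong_induction_on with
  | _ k IH =>
    intro n
    rw [phi_loop]
    have hmod : PySem.Int.mod ↑k 2 = ((k % 2 : Nat) : Int) := by
      exact_mod_cast PySem.Int.mod_natCast k 2
    by_cases hpar : k % 2 = 0
    · have hcond : PySem.Int.mod ↑k 2 = 0 ∧ ((↑k:Int) > 0) := by
        refine ⟨by rw [hmod, hpar]; rfl, by exact_mod_cast hk⟩
      rw [if_pos hcond]
      have hshift : (↑k:Int) >>> (1:Nat) = ((k/2 : Nat) : Int) := by
        rw [natCast_shiftRight, Nat.shiftRight_one]
      rw [hshift, IH (k/2) (by omega) (by omega) (n+1), tzN_even k hk hpar]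
      refine Prod.ext ?_ ?_
      · show n + 1 + ↑(tzN (k/2)) = n + ↑(tzN (k/2) + 1)
        push_cast; ring
      · show ((k/2 : Nat) >>> tzN (k/2) : Nat) = ((k >>> (tzN (k/2) + 1) : Nat) : Int)
        rw [Nat.add_comm, Nat.shiftRight_add, Nat.shiftRight_one]
    · have hpar1 : k % 2 = 1 := by omega
      rw [if_neg (by rw [hmod, hpar1]; simp)]
      rw [tzN_odd k hpar1, Nat.shiftRight_zero]
      simp

-- ===== VERDICT (by name: the statement is the Claim_ definition above) =====
theorem phi_prime_spec : Claim_equal_phi_prime := by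
  intro x _
  unfold Spec_phi_prime phi_prime phi_prime_alt
  by_cases hm : x + 1 > 0
  · rw [if_pos hm]
    obtain ⟨k, hk⟩ : ∃ k : Nat, x + 1 = ↑k := ⟨(x+1).toNat, by omega⟩
    have hk0 : 0 < k := by omega
    rw [hk, loop_eq k hk0 0, band_neg_self k hk0]
    have hbl := bitLength_lowbit_pos k hk0
    have h1 : ((PySem.Int.bitLength ↑(lowbit k) : Int) - 1) = ↑(tzN k) := by
      unfold tzN; omega
    simp only [h1, natCast_shiftRight]
    norm_num
  · rw [if_neg hm]
    rw [phi_loop, if_neg (by intro hc; exact hm hc.2)]
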